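-- pv_equiv track=rewrite | github.com/algorithmx/fortran2julia | Utinity.py | split_on_slash
-- ===== SOURCE A (Python) =====
-- def split_on_slash(ss):
--     cl,cr = 0,0
--     for i in range(0,len(ss)):
--         if ss[i] == '/':
--             cl += 1
--             continue
--         else:
--             break
--     if cl == len(ss):
--         return ['/'*cl, '', '']
--     else:
--         for i in range(len(ss)-1,-1,-1):
--             if ss[i] == '/':
--                 cr += 1
--                 continue
--             else:
--                 break
--         if cr == 0:
--             return [ss[0:cl], ss[cl:], '']
--         else:
--             return [ss[0:cl], ss[cl:-cr], ss[-cr:]]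
-- ===== SOURCE B (Python) =====
-- import re
--
-- def split_on_slash(ss):
--     m = re.fullmatch(r'(/*)([\s\S]*?)(/*)', ss)
--     return list(m.groups())
-- ===== Notes on version B (the rewrite author's own statement) =====
-- stated objective: idiomatic
-- what changed: Replaced the two explicit index-scanning loops and three-way branching with a single regular-expression fullmatch r'(/*)([\s\S]*?)(/*)' whose three groups are the result.
import Mathlib
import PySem

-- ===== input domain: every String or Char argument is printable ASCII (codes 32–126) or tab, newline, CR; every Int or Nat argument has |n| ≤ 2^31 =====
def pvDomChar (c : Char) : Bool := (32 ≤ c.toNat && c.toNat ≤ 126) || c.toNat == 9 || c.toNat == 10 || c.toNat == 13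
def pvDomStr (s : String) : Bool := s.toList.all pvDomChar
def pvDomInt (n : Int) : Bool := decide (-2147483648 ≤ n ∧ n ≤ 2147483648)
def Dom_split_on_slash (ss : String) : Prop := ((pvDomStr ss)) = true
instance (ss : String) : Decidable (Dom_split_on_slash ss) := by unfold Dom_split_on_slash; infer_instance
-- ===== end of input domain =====

-- B replaces A's two index-scanning loops and three-way branching by a single
-- regex fullmatch r'(/*)([\s\S]*?)(/*)' returning its three groups (idiomatic, same O(n) cost).

-- ===== PORT A =====
-- A's forward for-loop with break: count leading '/' characters.
def pvCountLead : List Char → Nat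
  | [] => 0
  | c :: rest => if c = '/' then pvCountLead rest + 1 else 0

-- A on the character list; the backward for-loop (i from len(ss)-1 down to 0,
-- breaking at the first non-'/') counts the leading '/' of the reversed list.
def pvSplitA (cs : List Char) : List (List Char) :=
  let cl := pvCountLead cs
  if cl = cs.length then
    [List.replicate cl '/', [], []]
  else
    let cr := pvCountLead cs.reverse
    if cr = 0 then
      [PySem.List.slice cs (some 0) (some (cl : Int)),
       PySem.List.slice cs (some (cl : Int)) none, []]
    else
      [PySem.List.slice cs (some 0) (some (cl : Int)),
       PySem.List.slice cs (some (cl : Int)) (some (-(cr : Int))),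
       PySem.List.slice cs (some (-(cr : Int))) none]

def split_on_slash (ss : String) : List String :=
  (pvSplitA ss.toList).map String.ofList

-- ===== PORT B =====
-- Source B's regex r'(/*)([\s\S]*?)(/*)': greedy leading '/'-run, greedy trailing
-- '/'-run of the remainder, lazy middle = what is left between them.
def pvSplitB (cs : List Char) : List (List Char) :=
  let lead := cs.takeWhile (· = '/')
  let rest := cs.dropWhile (· = '/')
  let trail := (rest.reverse.takeWhile (· = '/')).reverse
  [lead, rest.take (rest.length - trail.length), trail]

def split_on_slash_alt (ss : String) : List String :=
  (pvSplitB ss.toList).map String.ofList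

-- ===== PRECONDITION & SPEC =====
def Spec_split_on_slash (ss : String) (out : List String) : Prop := out = split_on_slash_alt ss
instance (ss : String) (out : List String) : Decidable (Spec_split_on_slash ss out) := by unfold Spec_split_on_slash; infer_instance

-- ===== CLAIM (what is proved, stated in full; the proofs are below) =====
def Claim_equal_split_on_slash : Prop := ∀ (ss : String), Dom_split_on_slash ss → Spec_split_on_slash ss (split_on_slash ss)

-- ===== LEMMAS AND PROOFS =====
theorem pvCountLead_eq_takeWhile (cs : List Char) :
    pvCountLead cs = (cs.takeWhile (· = '/')).length := by
  induction cs with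
  | nil => rfl
  | cons c rest ih =>
    by_cases h : c = '/' <;> simp [pvCountLead, List.takeWhile, h, ih]

theorem pvSplit_eq (cs : List Char) : pvSplitA cs = pvSplitB cs := by
  obtain ⟨lead, hlead⟩ : ∃ l, cs.takeWhile (· = '/') = l := ⟨_, rfl⟩
  obtain ⟨rest, hrest⟩ : ∃ l, cs.dropWhile (· = '/') = l := ⟨_, rfl⟩
  obtain ⟨trail, htrail⟩ : ∃ l, rest.reverse.takeWhile (· = '/') = l := ⟨_, rfl⟩
  have hcl : pvCountLead cs = lead.length := by
    rw [pvCountLead_eq_takeWhile, hlead]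
  have hsplit : lead ++ rest = cs := by
    rw [← hlead, ← hrest]; exact List.takeWhile_append_dropWhile
  have hLeadPref : lead <+: cs := hlead ▸ List.takeWhile_prefix _
  have hTrailPref : trail = rest.reverse.take trail.length := by
    rw [← htrail]; exact List.prefix_iff_eq_take.mp (List.takeWhile_prefix _)
  have hTrailLe : trail.length ≤ rest.length := by
    have := congrArg List.length hTrailPref
    simp at this; omega
  have hTrailDrop : trail.reverse = rest.drop (rest.length - trail.length) := by
    conv_lhs => rw [hTrailPref]
    rw [List.reverse_take]
    simp
  by_cases hall : lead.length = cs.length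
  · -- all-slash (or empty) string
    have hLeadEq : lead = cs := hLeadPref.eq_of_length hall
    have hAllSlash : ∀ x ∈ cs, decide (x = '/') = true := by
      intro x hx
      exact List.mem_takeWhile_imp (p := fun x => decide (x = '/'))
        (l := cs) (by rw [hlead, hLeadEq]; exact hx)
    have hRestNil : rest = [] := by
      rw [← hrest, List.dropWhile_eq_nil_iff]; exact hAllSlash
    have hRepl : List.replicate lead.length '/' = cs := by
      rw [eq_comm, List.eq_replicate_iff]
      exact ⟨hall.symm, fun b hb => by simpa using hAllSlash b hb⟩
    simp only [pvSplitA, hcl, if_pos hall]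
    simp only [pvSplitB, hlead, hrest, hRestNil, hLeadEq]
    simp [← hall, hRepl]
  · -- a non-'/' character exists; rest ≠ [] and its head is not '/'
    have hRestNe : rest ≠ [] := by
      intro h
      have := congrArg List.length hsplit
      simp [h] at this; omega
    have hTrailNeSelf : trail.length ≠ rest.reverse.length := by
      intro h
      have hpref : trail <+: rest.reverse := by
        rw [← htrail]; exact List.takeWhile_prefix _
      have hEq : trail = rest.reverse := hpref.eq_of_length h
      obtain ⟨c, rest', hc⟩ := List.exists_cons_of_ne_nil hRestNe
      have hw : cs.dropWhile (fun x => decide (x = '/')) ≠ [] := by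
        rw [hrest, hc]; simp
      have hdw := List.head_dropWhile_not (fun x => decide (x = '/')) (l := cs) (w := hw)
      have hhead : (cs.dropWhile (fun x => decide (x = '/'))).head hw = c := by
        simp only [hrest, hc, List.head_cons]
      rw [hhead] at hdw
      have : decide (c = '/') = true :=
        List.mem_takeWhile_imp (p := fun x => decide (x = '/')) (l := rest.reverse)
          (by rw [htrail, hEq, hc]; simp)
      rw [hdw] at this; exact Bool.false_ne_true this
    have hcr : pvCountLead cs.reverse = trail.length := by
      rw [pvCountLead_eq_takeWhile, ← hsplit, List.reverse_append,
        List.takeWhile_append, if_neg (by rw [htrail]; exact hTrailNeSelf), htrail]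
    have hTake : cs.take lead.length = lead := by
      conv_lhs => rw [← hsplit]
      exact List.take_left
    have hDrop : cs.drop lead.length = rest := by
      conv_lhs => rw [← hsplit]
      exact List.drop_left
    have hlenEq : cs.length = lead.length + rest.length := by
      have := congrArg List.length hsplit; simpa using this.symm
    simp only [pvSplitA, hcl, if_neg hall, hcr]
    by_cases hcr0 : trail.length = 0
    · have htnil : trail = [] := List.eq_nil_of_length_eq_zero hcr0
      rw [if_pos hcr0]
      simp [pvSplitB, hlead, hrest, htrail, htnil,
        PySem.List.slice_to_natCast, PySem.List.slice_from_natCast, hTake, hDrop]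
    · have hcrpos : 0 < trail.length := Nat.pos_of_ne_zero hcr0
      rw [if_neg hcr0]
      have hlead' : PySem.List.slice cs (some 0) (some (lead.length : Int)) = lead := by
        simp [PySem.List.slice_to_natCast, hTake]
      have hmid : PySem.List.slice cs (some (lead.length : Int)) (some (-(trail.length : Int)))
          = rest.take (rest.length - trail.length) := by
        simp only [PySem.List.slice, PySem.List.clampIdx_natCast,
          PySem.List.clampIdx_neg_natCast _ _ hcrpos]
        rw [min_eq_left (by omega), hDrop]
        congr 1
        omega
      have htr : PySem.List.slice cs (some (-(trail.length : Int))) none = trail.reverse := by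
        rw [PySem.List.slice_from_neg_natCast _ _ hcrpos, hTrailDrop]
        have h2 : cs.length - trail.length = lead.length + (rest.length - trail.length) := by
          omega
        rw [h2, ← hsplit, List.drop_append]
        simp
      simp [pvSplitB, hlead, hrest, htrail, hlead', hmid, htr]

theorem split_on_slash_eq_alt (ss : String) : split_on_slash ss = split_on_slash_alt ss := by
  unfold split_on_slash split_on_slash_alt
  rw [pvSplit_eq]

-- ===== VERDICT (by name: the statement is the Claim_ definition above) =====
theorem split_on_slash_spec : Claim_equal_split_on_slash := by
  intro ss _
  exact split_on_slash_eq_alt ss
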